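-- pv_equiv track=rewrite | github.com/codeflash-ai/codeflash | code_to_optimize/crosshair_tests.py | find_common_tags2_5
-- ===== SOURCE A (Python) =====
-- def find_common_tags2_5(articles: list[dict[str, list[str]]]) -> set[str]:
--     if not articles:
--         return set()
--
--     # Initialize with the first article's tags, defaulting to an empty list if "tags" is missing
--     common_tags = set(articles[0].get("tags", []))
--
--     for article in articles[1:]:
--         # Use .get("tags", []) to safely access tags, defaulting to an empty list if missing
--         common_tags.intersection_update(article.get("tags", []))
--
--         # Early exit if there are no common tags left
--         if not common_tags:
--             break
--
--     return common_tags
-- ===== SOURCE B (Python) =====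
-- def find_common_tags2_5(articles: list[dict[str, list[str]]]) -> set[str]:
--     if not articles:
--         return set()
--     n = len(articles)
--     counts = {}
--     for article in articles:
--         # count each tag once per article (dedupe intra-article duplicates)
--         for tag in dict.fromkeys(article.get("tags", [])):
--             counts[tag] = counts.get(tag, 0) + 1
--     # a tag is common iff it was seen in every article
--     return {tag for tag, c in counts.items() if c == n}
-- ===== Notes on version B (the rewrite author's own statement) =====
-- stated objective: alternative
-- what changed: Replaces the running-intersection-with-early-exit loop by a single counting pass: build a frequency table of per-article-deduplicated tags, then return the tags whose count equals the number of articles.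
import Mathlib
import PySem

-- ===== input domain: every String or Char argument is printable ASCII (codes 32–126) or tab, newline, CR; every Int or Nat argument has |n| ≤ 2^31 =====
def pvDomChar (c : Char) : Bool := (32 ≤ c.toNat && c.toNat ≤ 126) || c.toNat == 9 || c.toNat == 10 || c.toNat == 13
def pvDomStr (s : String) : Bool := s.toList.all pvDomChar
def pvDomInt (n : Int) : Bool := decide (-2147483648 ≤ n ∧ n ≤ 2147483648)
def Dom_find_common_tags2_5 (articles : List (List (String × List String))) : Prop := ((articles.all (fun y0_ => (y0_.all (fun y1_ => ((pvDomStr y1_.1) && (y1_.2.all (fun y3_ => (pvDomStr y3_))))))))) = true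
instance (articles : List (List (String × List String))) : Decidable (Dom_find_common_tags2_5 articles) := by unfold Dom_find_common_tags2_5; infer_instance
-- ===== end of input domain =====

-- B replaces A's running-intersection-with-early-exit by one counting pass (per-article
-- deduplicated tag frequencies, then keep the tags counted in every article); alternative, not faster.

-- ===== PORT A =====
-- article.get("tags", [])
def pvTags (article : List (String × List String)) : List String :=
  (PySem.Dict.mk article).getD "tags" []

-- the 'for article in articles[1:]' loop with its early 'break'
def pvLoopA (rest : List (List (String × List String))) (common_tags : PySem.Set String) :
    PySem.Set String :=
  match rest with
  | [] => common_tags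
  | article :: rest' =>
      let ct := PySem.Set.inter common_tags (pvTags article)
      if ct = [] then ct else pvLoopA rest' ct

def find_common_tags2_5 (articles : List (List (String × List String))) : List String :=
  match articles with
  | [] => []
  | a0 :: rest => pvLoopA rest (PySem.Set.ofList (pvTags a0))

-- ===== PORT B =====
def find_common_tags2_5_alt (articles : List (List (String × List String))) : List String :=
  match articles with
  | [] => []
  | _ :: _ =>
      let n : Int := (articles.length : Int)
      let counts : PySem.Dict String Int :=
        articles.foldl
          (fun d article =>
            (PySem.List.dedup (pvTags article)).foldl (fun d tag => d.modify tag 0 (· + 1)) d)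
          PySem.Dict.empty
      (counts.items.filter (fun kc => kc.2 == n)).map Prod.fst

-- ===== PRECONDITION & SPEC =====
def Spec_find_common_tags2_5 (articles : List (List (String × List String))) (out : List String) : Prop := out = find_common_tags2_5_alt articles
instance (articles : List (List (String × List String))) (out : List String) : Decidable (Spec_find_common_tags2_5 articles out) := by unfold Spec_find_common_tags2_5; infer_instance

-- ===== CLAIM (what is proved, stated in full; the proofs are below) =====
def Claim_equal_find_common_tags2_5 : Prop := ∀ (articles : List (List (String × List String))), Dom_find_common_tags2_5 articles → Spec_find_common_tags2_5 articles (find_common_tags2_5 articles)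

-- ===== LEMMAS AND PROOFS =====

-- A's loop computes a filter of its running set
theorem pvLoopA_eq_filter (rest : List (List (String × List String))) (s : PySem.Set String) :
    pvLoopA rest s = s.filter (fun t => decide (∀ a ∈ rest, t ∈ pvTags a)) := by
  induction rest generalizing s with
  | nil => simp [pvLoopA]
  | cons a rest ih =>
      have hinter : PySem.Set.inter s (pvTags a) = s.filter (fun t => decide (t ∈ pvTags a)) := by
        simp [PySem.Set.inter, PySem.Set.contains]
      have hsplit :
          s.filter (fun t => decide (∀ a' ∈ a :: rest, t ∈ pvTags a')) =
          (s.filter (fun t => decide (t ∈ pvTags a))).filter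
            (fun t => decide (∀ a' ∈ rest, t ∈ pvTags a')) := by
        rw [List.filter_filter]
        apply List.filter_congr
        intro x _
        simp [Bool.and_comm]
      rw [hsplit, ← hinter]
      simp only [pvLoopA]
      split
      · next h =>
          rw [h]
          simp
      · exact ih _

-- counting per-article deduplicated tags counts the articles containing the tag
theorem count_flatten_dedup (arts : List (List (String × List String))) (k : String) :
    ((arts.map (fun a => PySem.List.dedup (pvTags a))).flatten).count k =
      (arts.filter (fun a => decide (k ∈ pvTags a))).length := by
  induction arts with
  | nil => simp
  | cons a arts ih =>
      by_cases h : k ∈ pvTags a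
      · have h1 : (PySem.List.dedup (pvTags a)).count k = 1 :=
          List.count_eq_one_of_mem (PySem.List.nodup_dedup _) ((PySem.List.mem_dedup _ _).mpr h)
        rw [List.map_cons, List.flatten_cons, List.count_append, h1, ih,
          List.filter_cons_of_pos (by simpa using h), List.length_cons]
        omega
      · have h0 : (PySem.List.dedup (pvTags a)).count k = 0 :=
          List.count_eq_zero_of_not_mem (fun hm => h ((PySem.List.mem_dedup _ _).mp hm))
        rw [List.map_cons, List.flatten_cons, List.count_append, h0, ih,
          List.filter_cons_of_neg (by simpa using h)]
        omega

theorem count_eq_length_iff (arts : List (List (String × List String))) (k : String) :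
    ((arts.map (fun a => PySem.List.dedup (pvTags a))).flatten).count k = arts.length ↔
      ∀ a ∈ arts, k ∈ pvTags a := by
  rw [count_flatten_dedup]
  constructor
  · intro h a ha
    have := List.length_filter_eq_length_iff.mp h a ha
    simpa using this
  · intro h
    exact List.length_filter_eq_length_iff.mpr (fun a ha => by simpa using h a ha)

-- filtering by a predicate that forces membership in s ignores a Set.update
theorem filter_update_of_imp (P : String → Bool) (m : List String) :
    ∀ (s : PySem.Set String), (∀ k ∈ m, P k = true → k ∈ s) →
    (PySem.Set.update s m).filter P = s.filter P := by
  induction m with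
  | nil => intro s _; rfl
  | cons x m ih =>
      intro s h
      have hupd : PySem.Set.update s (x :: m) = PySem.Set.update (PySem.Set.add s x) m := rfl
      rw [hupd, ih (PySem.Set.add s x)
        (fun k hk hP => (PySem.Set.mem_add _ _ _).mpr (Or.inl (h k (List.mem_cons_of_mem _ hk) hP)))]
      by_cases hm : x ∈ s
      · simp [PySem.Set.add, PySem.Set.contains, hm]
      · have hPx : P x = false := by
          by_contra hne
          exact hm (h x List.mem_cons_self (by simpa using Bool.of_not_eq_false hne))
        simp [PySem.Set.add, PySem.Set.contains, hm, hPx]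

theorem find_common_tags2_5_eq (articles : List (List (String × List String))) :
    find_common_tags2_5 articles = find_common_tags2_5_alt articles := by
  match articles with
  | [] => rfl
  | a0 :: rest =>
      set arts := a0 :: rest with harts
      set allT := (arts.map (fun a => PySem.List.dedup (pvTags a))).flatten with hallT
      set restT := (rest.map (fun a => PySem.List.dedup (pvTags a))).flatten with hrestT
      have hcounts :
          arts.foldl
            (fun d article =>
              (PySem.List.dedup (pvTags article)).foldl (fun d tag => d.modify tag 0 (· + 1)) d)
            PySem.Dict.empty
          = PySem.Dict.counter allT := by
        rw [PySem.Dict.counter_eq_foldl, hallT, List.foldl_flatten, List.foldl_map]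
      have hB : find_common_tags2_5_alt arts =
          (PySem.Set.ofList allT).filter (fun k => decide (allT.count k = arts.length)) := by
        show (((arts.foldl _ PySem.Dict.empty).items.filter
            (fun kc => kc.2 == (arts.length : Int))).map Prod.fst) = _
        rw [hcounts, PySem.Dict.items_counter, List.filter_map, List.map_map]
        have : (fun kc : String × Int => kc.2 == (arts.length : Int)) ∘
            (fun k => (k, (allT.count k : Int))) = fun k => decide (allT.count k = arts.length) := by
          funext k
          by_cases hkn : allT.count k = arts.length
          · simp [hkn]
          · simp only [hkn, decide_false]
            exact beq_eq_false_iff_ne.mpr (fun hh => hkn (Nat.cast_inj.mp hh))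
        rw [this]
        simp [Function.comp_def]
      have hA : find_common_tags2_5 arts =
          (PySem.Set.ofList (pvTags a0)).filter
            (fun t => decide (∀ a ∈ rest, t ∈ pvTags a)) := pvLoopA_eq_filter rest _
      have hsplitT : allT = PySem.List.dedup (pvTags a0) ++ restT := by
        rw [hallT, harts, List.map_cons, List.flatten_cons, hrestT]
      have hof : PySem.Set.ofList allT =
          PySem.Set.update (PySem.Set.ofList (pvTags a0)) restT := by
        rw [hsplitT, PySem.List.dedup_eq_ofList]
        show List.foldl PySem.Set.add PySem.Set.empty _ = _
        rw [List.foldl_append]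
        show PySem.Set.update (PySem.Set.ofList (PySem.Set.ofList (pvTags a0))) restT = _
        rw [PySem.Set.ofList_ofList]
      have hmem : ∀ k ∈ restT, (decide (allT.count k = arts.length) : Bool) = true →
          k ∈ PySem.Set.ofList (pvTags a0) := by
        intro k _ hP
        have hall : ∀ a ∈ arts, k ∈ pvTags a :=
          (count_eq_length_iff arts k).mp (by simpa using hP)
        exact (PySem.Set.mem_ofList _ _).mpr (hall a0 (by rw [harts]; exact List.mem_cons_self))
      rw [hA, hB, hof, filter_update_of_imp _ _ _ hmem]
      apply List.filter_congr
      intro x hx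
      have hx0 : x ∈ pvTags a0 := (PySem.Set.mem_ofList _ _).mp hx
      simp only [decide_eq_decide]
      rw [count_eq_length_iff]
      constructor
      · intro h a ha
        rw [harts] at ha
        rcases List.mem_cons.mp ha with rfl | ha
        · exact hx0
        · exact h a ha
      · intro h a ha; exact h a (List.mem_cons_of_mem _ ha)

-- ===== VERDICT (by name: the statement is the Claim_ definition above) =====
theorem find_common_tags2_5_spec : Claim_equal_find_common_tags2_5 := by
  intro articles _
  exact find_common_tags2_5_eq articles
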